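-- pv_equiv track=rewrite | github.com/wumusill/BJ | Number_Theory/2960.py | solution
-- ===== SOURCE A (Python) =====
-- def solution(n, k):
--     l = [True] * (n + 1)
--     l[0] = False
--     l[1] = False
--
--     cnt = 0
--     for i in range(2, n + 1):
--         if l[i]:
--             for j in range(i, n + 1, i):
--                 if l[j]:
--                     l[j] = False
--                     cnt += 1
--                 if cnt == k:
--                     return j
-- ===== SOURCE B (Python) =====
-- def solution(n, k):
--     # smallest-prime-factor table: spf[m] = least prime dividing m (0 for m < 2)
--     spf = [0] * (n + 1)
--     for p in range(2, n + 1):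
--         if spf[p] == 0:              # p is prime
--             for m in range(p, n + 1, p):
--                 if spf[m] == 0:
--                     spf[m] = p
--     # the sieve erases each m exactly once, at the pass of its smallest prime
--     # factor, and within one pass in increasing order, so the erasure order is
--     # the numbers 2..n sorted by the key (spf[m], m)
--     order = sorted(range(2, n + 1), key=lambda m: (spf[m], m))
--     if 1 <= k <= len(order):
--         return order[k - 1]
--     return None
-- ===== Notes on version B (the rewrite author's own statement) =====
-- stated objective: alternative
-- what changed: Replaces A's interleaved mark-count-and-early-return sieve by building a smallest-prime-factor table in a sieve pass, then sorting 2..n by the key (spf[m], m) and indexing the sorted list at k-1.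
-- outside the precondition, e.g. on solution(5, 0): A returns None, B returns None; on solution(5, 9): A returns None, B returns None; on solution(1, 1): A returns None, B returns None
import Mathlib
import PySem

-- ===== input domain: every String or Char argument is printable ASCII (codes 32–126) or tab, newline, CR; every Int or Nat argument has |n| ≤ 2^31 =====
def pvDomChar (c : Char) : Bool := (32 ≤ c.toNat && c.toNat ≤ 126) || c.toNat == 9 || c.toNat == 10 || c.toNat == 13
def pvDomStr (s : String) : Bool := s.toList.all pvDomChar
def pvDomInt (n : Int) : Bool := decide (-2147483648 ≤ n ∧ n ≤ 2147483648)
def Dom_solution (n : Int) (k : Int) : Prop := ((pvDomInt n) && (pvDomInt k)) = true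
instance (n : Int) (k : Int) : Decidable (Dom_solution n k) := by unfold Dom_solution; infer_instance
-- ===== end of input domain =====

-- B re-implements A's interleaved sieve-with-count as: smallest-prime-factor table,
-- then sort 2..n by (spf[m], m) and index at k-1 (alternative algorithm, same values).

-- ===== PORT A =====
-- Python list indexing / assignment, modelled on Array (a Python list is an array);
-- exact for the nonnegative in-range indices that occur under Pre_solution
def pyAGet {α : Type} (a : Array α) (j : Int) (d : α) : α :=
  if 0 ≤ j then a.getD j.toNat d else d

def pyASet {α : Type} (a : Array α) (j : Int) (v : α) : Array α :=
  if 0 ≤ j then a.setIfInBounds j.toNat v else a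

-- l[j] and l[j]=False are pyGetD/pySetD: exact under Pre_solution, where the indices are in range.
def solInner (k : Int) : List Int → Array Bool → Int → (Array Bool × Int) ⊕ Int
  | [], l, cnt => Sum.inl (l, cnt)
  | j :: js, l, cnt =>
    let p := if pyAGet l j false
             then (pyASet l j false, cnt + 1) else (l, cnt)
    if p.2 = k then Sum.inr j else solInner k js p.1 p.2

def solOuter (k n : Int) : List Int → Array Bool → Int → Option Int
  | [], _, _ => none
  | i :: is, l, cnt =>
    if pyAGet l i false then
      match solInner k (PySem.List.pyRange i (n + 1) i) l cnt with
      | Sum.inr j => some j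
      | Sum.inl (l', cnt') => solOuter k n is l' cnt'
    else solOuter k n is l cnt

-- A returns None only outside Pre_solution; the port maps that fall-through to 0.
def solution (n : Int) (k : Int) : Int :=
  let l := pyASet (pyASet (Array.replicate (n + 1).toNat true) 0 false) 1 false
  (solOuter k n (PySem.List.pyRange 2 (n + 1) 1) l 0).getD 0

-- ===== PORT B =====
def spfInner (p : Int) : List Int → Array Int → Array Int
  | [], spf => spf
  | m :: ms, spf =>
    spfInner p ms (if pyAGet spf m 0 = 0 then pyASet spf m p else spf)

def spfOuter (n : Int) : List Int → Array Int → Array Int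
  | [], spf => spf
  | p :: ps, spf =>
    spfOuter n ps
      (if pyAGet spf p 0 = 0 then spfInner p (PySem.List.pyRange p (n + 1) p) spf
       else spf)

-- B returns None only outside Pre_solution; the port maps that branch to 0.
def solution_alt (n : Int) (k : Int) : Int :=
  let spf := spfOuter n (PySem.List.pyRange 2 (n + 1) 1) (Array.replicate (n + 1).toNat 0)
  -- sorted(range(2, n+1), key=lambda m: (spf[m], m)): a stable library sort under
  -- the lexicographic (≤) comparison of the key tuples
  let order := (PySem.List.pyRange 2 (n + 1) 1).mergeSort
      (fun a b => decide (pyAGet spf a 0 < pyAGet spf b 0)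
        || (!decide (pyAGet spf b 0 < pyAGet spf a 0) && decide (a ≤ b)))
  if 1 ≤ k ∧ k ≤ (order.length : Int) then PySem.List.pyGetD order (k - 1) 0 else 0

-- ===== PRECONDITION & SPEC =====
-- Pre_ excludes n ≤ 0, where A raises IndexError on l[1], and k outside 1..n-1, where A
-- falls off its loops and returns None, which is not a value of the declared Int type.
def Pre_solution (n : Int) (k : Int) : Prop := 2 ≤ n ∧ 1 ≤ k ∧ k ≤ n - 1
instance (n : Int) (k : Int) : Decidable (Pre_solution n k) := by unfold Pre_solution; infer_instance
def pvWitness_solution : Int × Int := (6, 3)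

def Spec_solution (n : Int) (k : Int) (out : Int) : Prop := out = solution_alt n k
instance (n : Int) (k : Int) (out : Int) : Decidable (Spec_solution n k out) := by unfold Spec_solution; infer_instance

-- ===== CLAIM (what is proved, stated in full; the proofs are below) =====
def Claim_equal_solution : Prop := ∀ (n : Int) (k : Int), Dom_solution n k → Pre_solution n k → Spec_solution n k (solution n k)

-- ===== LEMMAS AND PROOFS =====

-- mf m: the smallest prime factor of m (for 2 ≤ m), as an Int
def mf (m : Int) : Int := (m.toNat.minFac : Int)
-- the numbers erased during the pass of the outer index i (nonempty only for prime i)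
def eraseG (n i : Int) : List Int := (PySem.List.pyRange i (n + 1) i).filter (fun m => mf m = i)
-- the erasure sequence of all outer passes from index c on
def eraseE (n c : Int) : List Int := (PySem.List.pyRange c (n + 1) 1).flatMap (eraseG n)
-- integer encoding of the sort key (mf m, m); strictly increasing along eraseE
def keyE (n m : Int) : Int := mf m * (n + 1) + m

lemma mf_two_le {m : Int} (h : 2 ≤ m) : 2 ≤ mf m := by
  have h1 : m.toNat ≠ 1 := by omega
  have := (Nat.minFac_prime h1).two_le
  unfold mf; omega

lemma mf_le {m : Int} (h : 2 ≤ m) : mf m ≤ m := by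
  have : m.toNat.minFac ≤ m.toNat := Nat.minFac_le (by omega)
  unfold mf; omega

lemma mf_dvd {m : Int} (h : 0 ≤ m) : mf m ∣ m := by
  have h1 := Nat.minFac_dvd m.toNat
  have hm : ((m.toNat : Int)) = m := by omega
  unfold mf
  rw [← hm]
  exact_mod_cast h1

lemma mf_prime {m : Int} (h : 2 ≤ m) : Nat.Prime (m.toNat.minFac) :=
  Nat.minFac_prime (by omega)

lemma mf_min {m p : Int} (h : 2 ≤ m) (hp : 2 ≤ p) (hdvd : p ∣ m) : mf m ≤ p := by
  have hd : p.toNat ∣ m.toNat := by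
    rcases hdvd with ⟨d, rfl⟩
    have hd0 : 0 ≤ d := by nlinarith
    exact ⟨d.toNat, by rw [Int.toNat_mul (by omega) hd0]⟩
  have := Nat.minFac_le_of_dvd (by omega) hd
  unfold mf; omega

lemma mf_eq_self_of_prime {c : Int} (h : 2 ≤ c) (hp : Nat.Prime c.toNat) : mf c = c := by
  have := Nat.Prime.minFac_eq hp
  unfold mf; omega

-- pointwise effect of a write, for in-range Int indices
lemma aGet_aSet {α : Type} (xs : Array α) (j m : Int) (v d : α)
    (hj0 : 0 ≤ j) (hjl : j < (xs.size : Int)) (hm0 : 0 ≤ m) :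
    pyAGet (pyASet xs j v) m d = if m = j then v else pyAGet xs m d := by
  unfold pyAGet pyASet
  rw [if_pos hj0, if_pos hm0, if_pos hm0]
  have hjn : j.toNat < xs.size := by omega
  rw [Array.getD_eq_getD_getElem?, Array.getD_eq_getD_getElem?,
      Array.getElem?_setIfInBounds]
  by_cases he : m = j
  · subst he
    rw [if_pos rfl, if_pos hjn, if_pos rfl]
    rfl
  · rw [if_neg (by omega), if_neg he]

lemma aGet_replicate {α : Type} (N : Nat) (v d : α) (m : Int) (hm0 : 0 ≤ m) (hm : m < (N : Int)) :
    pyAGet (Array.replicate N v) m d = v := by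
  unfold pyAGet
  rw [if_pos hm0]
  have h : m.toNat < (Array.replicate N v).size := by simp; omega
  simp only [Array.getD, h, dif_pos]
  exact Array.getElem_replicate h

lemma size_aSet {α : Type} (xs : Array α) (j : Int) (v : α) : (pyASet xs j v).size = xs.size := by
  unfold pyASet
  split <;> simp

-- multiples of i in [i, n+1): membership, pairwise and bounds
lemma mem_pyRange_step {i m n : Int} (hi : 0 < i) :
    m ∈ PySem.List.pyRange i (n + 1) i ↔ i ≤ m ∧ m < n + 1 ∧ i ∣ m := by
  rw [PySem.List.mem_pyRange_iff_of_pos hi]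
  constructor
  · rintro ⟨h1, h2, h3⟩
    exact ⟨h1, h2, by have := dvd_add h3 (dvd_refl i); simpa using this⟩
  · rintro ⟨h1, h2, h3⟩
    exact ⟨h1, h2, dvd_sub h3 (dvd_refl i)⟩

lemma pairwise_lt_pyRange_step (i n : Int) (hi : 0 < i) :
    (PySem.List.pyRange i (n + 1) i).Pairwise (· < ·) := by
  rw [PySem.List.pyRange_of_pos _ _ hi]
  refine List.Pairwise.map _ ?_ (List.pairwise_lt_range)
  intro a b hab
  have : (a : Int) < b := by exact_mod_cast hab
  nlinarith

lemma nodup_pyRange_step (i n : Int) (hi : 0 < i) :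
    (PySem.List.pyRange i (n + 1) i).Nodup :=
  (pairwise_lt_pyRange_step i n hi).imp (fun h => by omega)

-- ---------- the erasure sequence ----------

lemma mem_eraseG {n i m : Int} (hi : 2 ≤ i) :
    m ∈ eraseG n i ↔ (i ≤ m ∧ m < n + 1 ∧ i ∣ m ∧ mf m = i) := by
  unfold eraseG
  rw [List.mem_filter, mem_pyRange_step (by omega)]
  simp only [decide_eq_true_eq]
  tauto

lemma mem_eraseE {n m : Int} : m ∈ eraseE n 2 ↔ 2 ≤ m ∧ m < n + 1 := by
  unfold eraseE
  rw [List.mem_flatMap]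
  constructor
  · rintro ⟨i, hi, hm⟩
    rw [PySem.List.mem_pyRange_one] at hi
    rw [mem_eraseG hi.1] at hm
    omega
  · rintro ⟨h2, hn⟩
    refine ⟨mf m, ?_, ?_⟩
    · rw [PySem.List.mem_pyRange_one]
      have := mf_two_le h2; have := mf_le h2; omega
    · rw [mem_eraseG (mf_two_le h2)]
      have := mf_two_le h2; have := mf_le h2
      exact ⟨by omega, by omega, mf_dvd (by omega), rfl⟩

lemma encode_lt_iff {n A B a c : Int} (ha : 0 ≤ a) (han : a < n + 1) (hc : 0 ≤ c) (hcn : c < n + 1) :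
    (A * (n + 1) + a < B * (n + 1) + c) ↔ (A < B ∨ (A = B ∧ a < c)) := by
  constructor
  · intro h
    rcases lt_trichotomy A B with h1 | h1 | h1
    · exact Or.inl h1
    · exact Or.inr ⟨h1, by nlinarith⟩
    · exfalso; nlinarith
  · rintro (h1 | ⟨h1, h2⟩)
    · nlinarith
    · nlinarith

lemma pairwise_keyE (n : Int) : (eraseE n 2).Pairwise (fun a b => keyE n a < keyE n b) := by
  unfold eraseE
  rw [List.pairwise_flatMap]
  constructor
  · intro i hi
    rw [PySem.List.mem_pyRange_one] at hi
    have h2i : (2:Int) ≤ i := hi.1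
    have hpw : (eraseG n i).Pairwise (· < ·) := by
      unfold eraseG
      exact (pairwise_lt_pyRange_step i n (by omega)).filter _
    refine hpw.imp_of_mem ?_
    intro a b ha hb hab
    rw [mem_eraseG h2i] at ha hb
    unfold keyE
    rw [ha.2.2.2, hb.2.2.2]
    omega
  · refine (PySem.List.pairwise_lt_pyRange_one 2 (n + 1)).imp_of_mem ?_
    intro i i' hi hi' hlt x hx y hy
    rw [PySem.List.mem_pyRange_one] at hi hi'
    rw [mem_eraseG hi.1] at hx
    rw [mem_eraseG hi'.1] at hy
    unfold keyE
    rw [hx.2.2.2, hy.2.2.2]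
    rw [encode_lt_iff (by omega) (by omega) (by omega) (by omega)]
    exact Or.inl hlt

lemma perm_eraseE (n : Int) : (eraseE n 2).Perm (PySem.List.pyRange 2 (n + 1) 1) := by
  have hnd : (eraseE n 2).Nodup :=
    (pairwise_keyE n).imp (fun h => by intro he; subst he; exact absurd h (lt_irrefl _))
  rw [List.perm_ext_iff_of_nodup hnd (PySem.List.nodup_pyRange_one _ _)]
  intro a
  rw [mem_eraseE, PySem.List.mem_pyRange_one]

lemma length_eraseE (n : Int) : ((eraseE n 2).length : Int) = ((n - 1).toNat : Int) := by
  have := (perm_eraseE n).length_eq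
  rw [this, PySem.List.length_pyRange_one]
  omega

-- ---------- A side ----------

lemma solInner_spec (k n : Int) (js : List Int) :
    ∀ (l : Array Bool) (cnt : Int), js.Nodup → (∀ j ∈ js, 0 ≤ j ∧ j < n + 1) →
    l.size = (n + 1).toNat → cnt < k →
    (if k ≤ cnt + ((js.filter (fun j => pyAGet l j false)).length : Int)
     then solInner k js l cnt =
            Sum.inr ((js.filter (fun j => pyAGet l j false)).getD (k - cnt - 1).toNat 0)
     else ∃ l', solInner k js l cnt =
            Sum.inl (l', cnt + ((js.filter (fun j => pyAGet l j false)).length : Int)) ∧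
          l'.size = l.size ∧
          ∀ m : Int, 0 ≤ m → m < n + 1 →
            pyAGet l' m false
              = (pyAGet l m false && !(decide (m ∈ js)))) := by
  induction js with
  | nil =>
    intro l cnt _ _ hlen hcnt
    rw [if_neg (by simp; omega)]
    exact ⟨l, by simp [solInner], rfl, by intro m _ _; simp⟩
  | cons j js ih =>
    intro l cnt hnd hrange hlen hcnt
    obtain ⟨hj0, hjn⟩ := hrange j (by simp)
    have hjl : j < (l.size : Int) := by omega
    obtain ⟨hjmem, hnd'⟩ := List.nodup_cons.mp hnd
    by_cases hb : pyAGet l j false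
    · -- l[j] is true: mark it and count
      have hfc : js.filter (fun x => pyAGet (pyASet l j false) x false)
          = js.filter (fun x => pyAGet l x false) := by
        apply List.filter_congr
        intro x hx
        obtain ⟨hx0, hxn⟩ := hrange x (by simp [hx])
        rw [aGet_aSet l j x false false hj0 hjl hx0,
            if_neg (by rintro rfl; exact hjmem hx)]
      have hL1 : (pyASet l j false).size = l.size := size_aSet _ _ _
      have hfilter : (List.filter (fun x => pyAGet l x false) (j :: js))
          = j :: js.filter (fun x => pyAGet l x false) := by
        simp [hb]
      by_cases hk : cnt + 1 = k
      · -- the k-th erasure happens right here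
        have hrun : solInner k (j :: js) l cnt = Sum.inr j := by
          simp [solInner, hb, hk]
        rw [if_pos (by rw [hfilter]; simp; omega), hfilter, hrun]
        have : (k - cnt - 1).toNat = 0 := by omega
        rw [this]
        rfl
      · have hcnt1 : cnt + 1 < k := by omega
        have IH := ih (pyASet l j false) (cnt + 1) hnd'
          (fun x hx => hrange x (by simp [hx])) (by rw [hL1, hlen]) hcnt1
        rw [hfc] at IH
        have hrun : solInner k (j :: js) l cnt
            = solInner k js (pyASet l j false) (cnt + 1) := by
          simp [solInner, hb, hk]
        rw [hfilter]
        by_cases hcond : k ≤ cnt + ((j :: js.filter (fun x => pyAGet l x false)).length : Int)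
        · rw [if_pos hcond]
          rw [if_pos (by simp at hcond ⊢; omega)] at IH
          rw [hrun, IH]
          have hge : k - cnt - 1 ≥ 1 := by omega
          have : (k - cnt - 1).toNat = (k - (cnt + 1) - 1).toNat + 1 := by omega
          rw [this]
          rfl
        · rw [if_neg hcond]
          rw [if_neg (by simp at hcond ⊢; omega)] at IH
          obtain ⟨l', heq, hlen', hpt⟩ := IH
          refine ⟨l', by rw [hrun, heq]; congr 1; congr 1; simp; ring, by rw [hlen', hL1], ?_⟩
          intro m hm0 hmn
          rw [hpt m hm0 hmn, aGet_aSet l j m false false hj0 hjl hm0]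
          by_cases he : m = j
          · subst he; simp [hjmem]
          · simp [he]
    · -- l[j] is false: no mark; cnt < k so the return check does not fire
      have hrun : solInner k (j :: js) l cnt = solInner k js l cnt := by
        simp [solInner, hb, show ¬ (cnt = k) by omega]
      have hfilter : (List.filter (fun x => pyAGet l x false) (j :: js))
          = js.filter (fun x => pyAGet l x false) := by
        simp [hb]
      rw [hfilter, hrun]
      have IH := ih l cnt hnd' (fun x hx => hrange x (by simp [hx])) hlen hcnt
      by_cases hcond : k ≤ cnt + ((js.filter (fun x => pyAGet l x false)).length : Int)
      · rw [if_pos hcond]; rw [if_pos hcond] at IH; exact IH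
      · rw [if_neg hcond]; rw [if_neg hcond] at IH
        obtain ⟨l', heq, hlen', hpt⟩ := IH
        refine ⟨l', heq, hlen', ?_⟩
        intro m hm0 hmn
        rw [hpt m hm0 hmn]
        by_cases he : m = j
        · subst he
          have hbf : pyAGet l m false = false := by
            cases h : pyAGet l m false
            · rfl
            · exact absurd h hb
          simp [hbf]
        · simp [he]

lemma solOuter_spec (k n : Int) : ∀ (t : Nat) (c : Int) (l : Array Bool) (cnt : Int),
    (n + 1 - c).toNat = t → 2 ≤ c →
    l.size = (n + 1).toNat →
    (∀ m : Int, 0 ≤ m → m < n + 1 →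
      pyAGet l m false = decide (2 ≤ m ∧ c ≤ mf m)) →
    cnt < k →
    solOuter k n (PySem.List.pyRange c (n + 1) 1) l cnt =
      (if k ≤ cnt + ((eraseE n c).length : Int)
       then some ((eraseE n c).getD (k - cnt - 1).toNat 0) else none) := by
  intro t
  induction t with
  | zero =>
    intro c l cnt ht hc hlen hstate hcnt
    have hE : eraseE n c = [] := by
      unfold eraseE; rw [PySem.List.pyRange_one_eq_nil (by omega)]; rfl
    rw [PySem.List.pyRange_one_eq_nil (by omega), hE]
    simp only [solOuter, List.length_nil]
    rw [if_neg (by push_cast; omega)]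
  | succ t ih =>
    intro c l cnt ht hc hlen hstate hcnt
    have hcn : c < n + 1 := by omega
    have h2c : (2:Int) ≤ c := hc
    have hEsplit : eraseE n c = eraseG n c ++ eraseE n (c + 1) := by
      unfold eraseE; rw [PySem.List.pyRange_one_cons hcn]; simp
    have hcv := hstate c (by omega) hcn
    rw [PySem.List.pyRange_one_cons hcn]
    simp only [solOuter]
    by_cases hpr : mf c < c
    · -- c composite: l[c] = False, nothing is erased this pass
      rw [hcv, if_neg (by simp; omega)]
      have hG : eraseG n c = [] := by
        rw [List.eq_nil_iff_forall_not_mem]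
        intro m hm
        rw [mem_eraseG h2c] at hm
        have h2m : (2:Int) ≤ m := by omega
        have hprm : Nat.Prime c.toNat := by
          have h1 : m.toNat.minFac = c.toNat := by
            have := hm.2.2.2; unfold mf at this; omega
          rw [← h1]; exact mf_prime h2m
        have := mf_eq_self_of_prime h2c hprm
        omega
      have hIH := ih (c + 1) l cnt (by omega) (by omega) hlen ?_ hcnt
      · rw [hIH, hEsplit, hG, List.nil_append]
      · intro m hm0 hmn
        rw [hstate m hm0 hmn]
        by_cases h2 : 2 ≤ m
        · by_cases hle : c ≤ mf m
          · have hne : mf m ≠ c := by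
              intro he
              have hprm : Nat.Prime c.toNat := by
                have h1 : m.toNat.minFac = c.toNat := by unfold mf at he; omega
                rw [← h1]; exact mf_prime h2
              have := mf_eq_self_of_prime h2c hprm
              omega
            simp [h2, hle, show c + 1 ≤ mf m by omega]
          · simp [h2, hle, show ¬ (c + 1 ≤ mf m) by omega]
        · simp [h2]
    · -- c prime: l[c] = True, the pass erases every live multiple of c
      have hmfc : mf c = c := by have := mf_le h2c; omega
      rw [hcv, if_pos (by simp; omega)]
      have hmarks : (PySem.List.pyRange c (n + 1) c).filter
          (fun j => pyAGet l j false) = eraseG n c := by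
        unfold eraseG
        apply List.filter_congr
        intro j hj
        rw [mem_pyRange_step (by omega)] at hj
        have h2j : (2:Int) ≤ j := by omega
        have hle : mf j ≤ c := mf_min h2j h2c hj.2.2
        rw [hstate j (by omega) hj.2.1]
        by_cases he : mf j = c
        · simp [he, h2j]
        · simp [he, h2j, show ¬ (c ≤ mf j) by omega]
      have hinner := solInner_spec k n (PySem.List.pyRange c (n + 1) c) l cnt
        (nodup_pyRange_step c n (by omega))
        (by intro j hj; rw [mem_pyRange_step (by omega)] at hj; omega)
        hlen hcnt
      rw [hmarks] at hinner
      by_cases hcond : k ≤ cnt + ((eraseG n c).length : Int)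
      · rw [if_pos hcond] at hinner
        rw [hinner]
        dsimp only
        rw [hEsplit]
        have hlt : (k - cnt - 1).toNat < (eraseG n c).length := by omega
        have hcc : k ≤ cnt + (((eraseG n c ++ eraseE n (c + 1)).length : Nat) : Int) := by
          simp only [List.length_append]; push_cast; omega
        rw [if_pos hcc, List.getD_append _ _ _ _ hlt]
      · rw [if_neg hcond] at hinner
        obtain ⟨l', heq, hlen', hpt⟩ := hinner
        rw [heq]
        dsimp only
        have hcnt' : cnt + ((eraseG n c).length : Int) < k := by omega
        have hstate' : ∀ m : Int, 0 ≤ m → m < n + 1 →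
            pyAGet l' m false = decide (2 ≤ m ∧ c + 1 ≤ mf m) := ?_
        have hIH := ih (c + 1) l' (cnt + ((eraseG n c).length : Int)) (by omega) (by omega)
          (by omega) hstate' hcnt'
        · rw [hIH, hEsplit]
          by_cases hcond2 : k ≤ cnt + ((eraseG n c).length : Int) + ((eraseE n (c + 1)).length : Int)
          · have hc2 : k ≤ cnt + (((eraseG n c ++ eraseE n (c + 1)).length : Nat) : Int) := by
              simp only [List.length_append]; push_cast; omega
            rw [if_pos hcond2, if_pos hc2]
            have hge : (eraseG n c).length ≤ (k - cnt - 1).toNat := by omega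
            rw [List.getD_append_right _ _ _ _ hge]
            have hidx : (k - cnt - 1).toNat - (eraseG n c).length
                = (k - (cnt + ((eraseG n c).length : Int)) - 1).toNat := by omega
            rw [hidx]
          · have hc2 : ¬ k ≤ cnt + (((eraseG n c ++ eraseE n (c + 1)).length : Nat) : Int) := by
              simp only [List.length_append]; push_cast at hcond2 ⊢; omega
            rw [if_neg hcond2, if_neg hc2]
        · intro m hm0 hmn
          rw [hpt m hm0 hmn, hstate m hm0 hmn]
          by_cases h2 : 2 ≤ m
          · have hmf2 := mf_two_le h2
            by_cases hle : c ≤ mf m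
            · by_cases he : mf m = c
              · have hmem : m ∈ PySem.List.pyRange c (n + 1) c := by
                  rw [mem_pyRange_step (by omega)]
                  have := mf_le h2
                  exact ⟨by omega, hmn, by rw [← he]; exact mf_dvd (by omega)⟩
                simp [h2, hle, hmem, show ¬ (c + 1 ≤ mf m) by omega]
              · have hnmem : m ∉ PySem.List.pyRange c (n + 1) c := by
                  intro hmem
                  rw [mem_pyRange_step (by omega)] at hmem
                  have : mf m ≤ c := mf_min h2 h2c hmem.2.2
                  omega
                simp [h2, hle, hnmem, show c + 1 ≤ mf m by omega]
            · simp [h2, hle, show ¬ (c + 1 ≤ mf m) by omega]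
          · simp [h2]

-- ---------- B side: the spf table ----------

lemma spfInner_spec (p n : Int) (js : List Int) :
    ∀ (spf : Array Int), (∀ j ∈ js, 0 ≤ j ∧ j < n + 1) → spf.size = (n + 1).toNat →
    (spfInner p js spf).size = spf.size ∧
    ∀ m : Int, 0 ≤ m → m < n + 1 →
      pyAGet (spfInner p js spf) m 0 =
        (if m ∈ js ∧ pyAGet spf m 0 = 0 then p else pyAGet spf m 0) := by
  induction js with
  | nil => intro spf _ hlen; exact ⟨rfl, by intro m _ _; simp [spfInner]⟩
  | cons j js ih =>
    intro spf hrange hlen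
    obtain ⟨hj0, hjn⟩ := hrange j (by simp)
    have hjl : j < (spf.size : Int) := by omega
    set spf1 := (if pyAGet spf j 0 = 0 then pyASet spf j p else spf) with hspf1
    have hlen1 : spf1.size = spf.size := by
      rw [hspf1]; split <;> simp [size_aSet]
    have hpt : ∀ m : Int, 0 ≤ m → m < n + 1 →
        pyAGet spf1 m 0 =
          (if m = j ∧ pyAGet spf m 0 = 0 then p else pyAGet spf m 0) := by
      intro m hm0 hmn
      rw [hspf1]
      by_cases hz : pyAGet spf j 0 = 0
      · simp only [hz, if_true]
        rw [aGet_aSet spf j m p 0 hj0 hjl hm0]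
        by_cases he : m = j
        · subst he; simp [hz]
        · simp [he]
      · simp only [hz, if_false]
        by_cases he : m = j
        · subst he; simp [hz]
        · simp [he]
    obtain ⟨ihlen, ihpt⟩ := ih spf1 (fun x hx => hrange x (by simp [hx])) (by omega)
    refine ⟨by simpa [spfInner, ← hspf1, hlen1] using ihlen, ?_⟩
    intro m hm0 hmn
    have : spfInner p (j :: js) spf = spfInner p js spf1 := by simp [spfInner, ← hspf1]
    rw [this, ihpt m hm0 hmn, hpt m hm0 hmn]
    by_cases he : m = j
    · subst he
      by_cases hz : pyAGet spf m 0 = 0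
      · by_cases hmem : m ∈ js <;> simp [hz, hmem]
      · simp [hz]
    · have : (m ∈ j :: js) ↔ m ∈ js := by simp [he]
      simp only [he, false_and, if_false, this]

lemma spfOuter_spec (n : Int) : ∀ (t : Nat) (c : Int) (spf : Array Int),
    (n + 1 - c).toNat = t → 2 ≤ c → spf.size = (n + 1).toNat →
    (∀ m : Int, 0 ≤ m → m < n + 1 →
      pyAGet spf m 0 = (if 2 ≤ m ∧ mf m < c then mf m else 0)) →
    ∀ m : Int, 0 ≤ m → m < n + 1 →
      pyAGet (spfOuter n (PySem.List.pyRange c (n + 1) 1) spf) m 0 =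
        (if 2 ≤ m ∧ mf m < n + 1 then mf m else 0) := by
  intro t
  induction t with
  | zero =>
    intro c spf ht hc hlen hstate m hm0 hmn
    rw [PySem.List.pyRange_one_eq_nil (by omega)]
    simp only [spfOuter]
    rw [hstate m hm0 hmn]
    by_cases h2 : 2 ≤ m
    · have := mf_le h2
      simp [h2, show mf m < c by omega, show mf m < n + 1 by omega]
    · simp [h2]
  | succ t ih =>
    intro c spf ht hc hlen hstate
    have hcn : c < n + 1 := by omega
    rw [PySem.List.pyRange_one_cons hcn]
    simp only [spfOuter]
    have hcv := hstate c (by omega) hcn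
    by_cases hpr : mf c < c
    · -- c composite: spf[c] = mf c ≠ 0, table unchanged this pass
      have h2c : (2:Int) ≤ c := hc
      have hmfc := mf_two_le h2c
      rw [if_pos ⟨h2c, hpr⟩] at hcv
      rw [if_neg (by omega)]
      refine ih (c + 1) spf (by omega) (by omega) hlen ?_
      intro m hm0 hmn
      rw [hstate m hm0 hmn]
      by_cases h2 : 2 ≤ m
      · by_cases hlt : mf m < c
        · simp [h2, hlt, show mf m < c + 1 by omega]
        · have hne : mf m ≠ c := by
            intro he
            have hprm : Nat.Prime c.toNat := by
              have h1 : m.toNat.minFac = c.toNat := by unfold mf at he; omega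
              rw [← h1]; exact mf_prime h2
            have := mf_eq_self_of_prime h2c hprm
            omega
          simp [h2, hlt, show ¬ (mf m < c + 1) by omega]
      · simp [h2]
    · -- c prime: spf[c] = 0, the pass writes c into every unmarked multiple of c
      have h2c : (2:Int) ≤ c := hc
      have hmfc : mf c = c := by have := mf_le h2c; omega
      rw [if_neg (by omega)] at hcv
      rw [if_pos hcv]
      obtain ⟨hlen1, hpt⟩ := spfInner_spec c n (PySem.List.pyRange c (n + 1) c) spf
        (by intro j hj; rw [mem_pyRange_step (by omega)] at hj; omega) hlen
      refine ih (c + 1) _ (by omega) (by omega) (by omega) ?_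
      intro m hm0 hmn
      rw [hpt m hm0 hmn, hstate m hm0 hmn]
      by_cases h2 : 2 ≤ m
      · have hmf2 := mf_two_le h2
        have hmfle := mf_le h2
        by_cases hlt : mf m < c
        · simp [h2, hlt, show mf m < c + 1 by omega, show ¬ (mf m = 0) by omega]
        · by_cases heq : mf m = c
          · have hmem : m ∈ PySem.List.pyRange c (n + 1) c := by
              rw [mem_pyRange_step (by omega)]
              exact ⟨by omega, hmn, by rw [← heq]; exact mf_dvd (by omega)⟩
            simp [h2, hmem, heq]
          · have hnmem : m ∉ PySem.List.pyRange c (n + 1) c := by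
              intro hmem
              rw [mem_pyRange_step (by omega)] at hmem
              have : mf m ≤ c := mf_min h2 h2c hmem.2.2
              omega
            simp [h2, hlt, hnmem, show ¬ (mf m < c + 1) by omega]
      · have hnmem : m ∉ PySem.List.pyRange c (n + 1) c := by
          intro hmem
          rw [mem_pyRange_step (by omega)] at hmem
          omega
        simp [h2, hnmem]

-- ---------- sorting ----------

lemma order_eq_eraseE (n : Int) (spf : Array Int)
    (hsp : ∀ m : Int, 0 ≤ m → m < n + 1 →
      pyAGet spf m 0 = (if 2 ≤ m ∧ mf m < n + 1 then mf m else 0)) :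
    (PySem.List.pyRange 2 (n + 1) 1).mergeSort
      (fun a b => decide (pyAGet spf a 0 < pyAGet spf b 0)
        || (!decide (pyAGet spf b 0 < pyAGet spf a 0) && decide (a ≤ b))) = eraseE n 2 := by
  set le := fun a b : Int => decide (pyAGet spf a 0 < pyAGet spf b 0)
        || (!decide (pyAGet spf b 0 < pyAGet spf a 0) && decide (a ≤ b)) with hle
  have hle_iff : ∀ a b : Int, le a b = true ↔
      (pyAGet spf a 0 < pyAGet spf b 0 ∨ (pyAGet spf a 0 ≤ pyAGet spf b 0 ∧ a ≤ b)) := by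
    intro a b
    simp [hle]
  have hkey : ∀ m : Int, m ∈ PySem.List.pyRange 2 (n + 1) 1 →
      pyAGet spf m 0 = mf m := by
    intro m hm
    rw [PySem.List.mem_pyRange_one] at hm
    have h2 : (2:Int) ≤ m := hm.1
    have := mf_le h2
    rw [hsp m (by omega) (by omega), if_pos ⟨h2, by omega⟩]
  have htrans : ∀ a b c : Int, le a b = true → le b c = true → le a c = true := by
    intro a b c hab hbc
    rw [hle_iff] at hab hbc ⊢
    omega
  have htotal : ∀ a b : Int, (le a b || le b a) = true := by
    intro a b
    by_cases h : le a b = true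
    · simp [h]
    · have : le b a = true := by
        rw [hle_iff]
        rw [hle_iff] at h
        omega
      simp [this]
  have hperm := List.mergeSort_perm (PySem.List.pyRange 2 (n + 1) 1) le
  have hsorted := List.pairwise_mergeSort htrans htotal (PySem.List.pyRange 2 (n + 1) 1)
  have hnd : ((PySem.List.pyRange 2 (n + 1) 1).mergeSort le).Nodup :=
    hperm.nodup_iff.mpr (PySem.List.nodup_pyRange_one _ _)
  have hstrict : ((PySem.List.pyRange 2 (n + 1) 1).mergeSort le).Pairwise
      (fun a b => keyE n a < keyE n b) := by
    have hand := hsorted.and hnd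
    refine hand.imp_of_mem ?_
    intro a b ha hb hab
    have hax := hperm.subset ha
    have hbx := hperm.subset hb
    obtain ⟨hab1, hab2⟩ := hab
    rw [hle_iff, hkey a hax, hkey b hbx] at hab1
    rw [PySem.List.mem_pyRange_one] at hax hbx
    have hiff : (keyE n a < keyE n b) ↔ (mf a < mf b ∨ (mf a = mf b ∧ a < b)) := by
      unfold keyE
      exact encode_lt_iff (by omega) (by omega) (by omega) (by omega)
    rw [hiff]
    rcases hab1 with h | ⟨h1, h2⟩
    · exact Or.inl h
    · rcases eq_or_lt_of_le h1 with h3 | h3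
      · exact Or.inr ⟨h3, lt_of_le_of_ne h2 hab2⟩
      · exact Or.inl h3
  exact List.Perm.eq_of_pairwise
    (fun a b _ _ hab hba => absurd (lt_trans hab hba) (lt_irrefl _))
    hstrict (pairwise_keyE n) (hperm.trans (perm_eraseE n).symm)

-- ===== VERDICT (by name: the statement is the Claim_ definition above) =====
theorem solution_spec : Claim_equal_solution := by
  unfold Claim_equal_solution Spec_solution Pre_solution
  intro n k _ hpre
  obtain ⟨hn, hk1, hk2⟩ := hpre
  have hlenE : ((eraseE n 2).length : Int) = n - 1 := by
    rw [length_eraseE n]; omega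
  -- the A side: the k-th erased number is entry k-1 of the erasure sequence
  have hA : solution n k = (eraseE n 2).getD (k - 1).toNat 0 := by
    unfold solution
    dsimp only
    have hlen1 : (pyASet (pyASet
        (Array.replicate (n + 1).toNat true) 0 false) 1 false).size = (n + 1).toNat := by
      rw [size_aSet, size_aSet, Array.size_replicate]
    have hstate : ∀ m : Int, 0 ≤ m → m < n + 1 →
        pyAGet (pyASet (pyASet
          (Array.replicate (n + 1).toNat true) 0 false) 1 false) m false
          = decide (2 ≤ m ∧ 2 ≤ mf m) := by
      intro m hm0 hmn
      rw [aGet_aSet _ 1 m false false (by omega)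
          (by rw [size_aSet, Array.size_replicate]; omega) hm0]
      by_cases h1 : m = 1
      · subst h1; simp
      · rw [if_neg h1,
            aGet_aSet _ 0 m false false (by omega) (by rw [Array.size_replicate]; omega) hm0]
        by_cases h0 : m = 0
        · subst h0; simp
        · rw [if_neg h0, aGet_replicate _ _ _ m hm0 (by omega)]
          have h2 : (2:Int) ≤ m := by omega
          have := mf_two_le h2
          simp [h2, by omega]
    have := solOuter_spec k n (n + 1 - 2).toNat 2
      (pyASet (pyASet
        (Array.replicate (n + 1).toNat true) 0 false) 1 false) 0
      rfl (by omega) hlen1 hstate (by omega)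
    rw [this, if_pos (by omega)]
    have : k - 0 - 1 = k - 1 := by omega
    rw [this, Option.getD_some]
  -- the B side: the spf table is mf, sorting gives the erasure sequence
  have hB : solution_alt n k = (eraseE n 2).getD (k - 1).toNat 0 := by
    unfold solution_alt
    dsimp only
    have hsp := spfOuter_spec n (n + 1 - 2).toNat 2 (Array.replicate (n + 1).toNat 0)
      rfl (by omega) (by rw [Array.size_replicate])
      (by
        intro m hm0 hmn
        rw [aGet_replicate _ _ _ m hm0 (by omega)]
        by_cases h2 : (2:Int) ≤ m
        · have := mf_two_le h2
          rw [if_neg (by omega)]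
        · rw [if_neg (by tauto)])
    rw [order_eq_eraseE n _ hsp]
    rw [if_pos ⟨hk1, by omega⟩]
    rw [PySem.List.pyGetD_of_nonneg _ _ (by omega)]
  rw [hA, hB]
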